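-- pv_equiv track=rewrite | github.com/AvadaRava/CFG-Implementation | tema3.py | recognize_an_bn_cn
-- ===== SOURCE A (Python) =====
-- def recognize_an_bn_cn(s):
--     if not s or any(c not in 'abc' for c in s):
--         return False
--
--     n = len(s)
--     i = 0
--     n_a = n_b = n_c = 0
--
--     while i < n and s[i] == 'a':
--         n_a += 1
--         i += 1
--
--     while i < n and s[i] == 'b':
--         n_b += 1
--         i += 1
--
--     while i < n and s[i] == 'c':
--         n_c += 1
--         i += 1
--
--     if i != n:
--         return False
--     return n_a == n_b == n_c and n_a >= 1
-- ===== SOURCE B (Python) =====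
-- def recognize_an_bn_cn(s):
--     n = len(s)
--     k = n // 3
--     return n >= 3 and n % 3 == 0 and s == 'a' * k + 'b' * k + 'c' * k
-- ===== Notes on version B (the rewrite author's own statement) =====
-- stated objective: simpler
-- what changed: B replaces A's validity scan plus three counting while-loops with a build-and-compare: it constructs the unique canonical string a^k b^k c^k of the input's length and tests a single string equality.
import Mathlib
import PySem

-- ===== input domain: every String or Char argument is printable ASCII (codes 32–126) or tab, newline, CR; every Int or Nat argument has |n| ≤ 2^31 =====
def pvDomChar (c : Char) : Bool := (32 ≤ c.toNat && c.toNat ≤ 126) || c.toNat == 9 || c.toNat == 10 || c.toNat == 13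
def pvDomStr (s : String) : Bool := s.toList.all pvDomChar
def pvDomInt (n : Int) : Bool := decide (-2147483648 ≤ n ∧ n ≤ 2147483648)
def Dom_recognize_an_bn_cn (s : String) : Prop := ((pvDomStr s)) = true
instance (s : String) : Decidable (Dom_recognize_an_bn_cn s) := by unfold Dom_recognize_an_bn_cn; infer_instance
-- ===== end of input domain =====

-- B replaces A's validity scan plus three counting while-loops with a single
-- build-and-compare against the canonical string a^k b^k c^k (objective: simpler).

-- ===== PORT A =====
-- each of A's three while-loops: count how many leading characters equal c, return the rest
def pvCountWhile (c : Char) : List Char → Nat × List Char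
  | [] => (0, [])
  | x :: xs =>
    if x = c then
      let p := pvCountWhile c xs
      (p.1 + 1, p.2)
    else (0, x :: xs)

def recognize_an_bn_cn (s : String) : Bool :=
  let l := s.toList
  if l.isEmpty || l.any (fun c => !(c == 'a' || c == 'b' || c == 'c')) then false
  else
    let p1 := pvCountWhile 'a' l          -- first while: n_a, position after a-run
    let p2 := pvCountWhile 'b' p1.2       -- second while: n_b
    let p3 := pvCountWhile 'c' p2.2       -- third while: n_c
    if p3.2 ≠ [] then false               -- i != n
    else decide (p1.1 = p2.1 ∧ p2.1 = p3.1 ∧ 1 ≤ p1.1)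

-- ===== PORT B =====
def recognize_an_bn_cn_alt (s : String) : Bool :=
  let n := s.toList.length
  let k := n / 3
  decide (3 ≤ n) && decide (n % 3 = 0) &&
    (s.toList == List.replicate k 'a' ++ List.replicate k 'b' ++ List.replicate k 'c')

-- ===== PRECONDITION & SPEC =====
def Spec_recognize_an_bn_cn (s : String) (out : Bool) : Prop := out = recognize_an_bn_cn_alt s
instance (s : String) (out : Bool) : Decidable (Spec_recognize_an_bn_cn s out) := by unfold Spec_recognize_an_bn_cn; infer_instance

-- ===== CLAIM (what is proved, stated in full; the proofs are below) =====
def Claim_equal_recognize_an_bn_cn : Prop := ∀ (s : String), Dom_recognize_an_bn_cn s → Spec_recognize_an_bn_cn s (recognize_an_bn_cn s)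

-- ===== LEMMAS AND PROOFS =====

-- characterisation of one while-loop: it splits off exactly the leading run of c
theorem pvCountWhile_spec (c : Char) (l : List Char) :
    l = List.replicate (pvCountWhile c l).1 c ++ (pvCountWhile c l).2 ∧
      (pvCountWhile c l).2.head? ≠ some c := by
  induction l with
  | nil => simp [pvCountWhile]
  | cons x xs ih =>
    by_cases h : x = c
    · simp only [pvCountWhile, if_pos h]
      refine ⟨?_, ih.2⟩
      conv_lhs => rw [ih.1]
      simp [h, List.replicate_succ]
    · simp [pvCountWhile, h]

theorem pvCountWhile_none (c : Char) (r : List Char) (h : r.head? ≠ some c) :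
    pvCountWhile c r = (0, r) := by
  cases r with
  | nil => simp [pvCountWhile]
  | cons x xs =>
    have : x ≠ c := by simpa using h
    simp [pvCountWhile, this]

theorem pvCountWhile_rep (c : Char) (k : Nat) (r : List Char) (h : r.head? ≠ some c) :
    pvCountWhile c (List.replicate k c ++ r) = (k, r) := by
  induction k with
  | zero => simpa using pvCountWhile_none c r h
  | succ m ih => simp [List.replicate_succ, pvCountWhile, ih]

-- the canonical form: both programs return true exactly on a^k b^k c^k with k ≥ 1
theorem portA_true_of_canon (s : String) (k : Nat) (hk : 1 ≤ k)
    (h : s.toList = List.replicate k 'a' ++ List.replicate k 'b' ++ List.replicate k 'c') :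
    recognize_an_bn_cn s = true := by
  have hne : s.toList.isEmpty = false := by
    rw [h]; cases k with
    | zero => omega
    | succ m => simp [List.replicate_succ]
  have hall : (s.toList.any fun c => !(c == 'a' || c == 'b' || c == 'c')) = false := by
    rw [h]
    simp only [List.any_append, Bool.or_eq_false_iff]
    refine ⟨⟨?_, ?_⟩, ?_⟩ <;>
      · rw [List.any_eq_false]
        intro x hx
        rw [List.mem_replicate] at hx
        obtain ⟨-, rfl⟩ := hx
        decide
  have hb : (List.replicate k 'b' ++ List.replicate k 'c').head? ≠ some 'a' := by
    cases k with
    | zero => omega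
    | succ m => simp [List.replicate_succ]
  have hc : (List.replicate k 'c').head? ≠ some 'b' := by
    cases k with
    | zero => omega
    | succ m => simp [List.replicate_succ]
  have h1 : pvCountWhile 'a' s.toList = (k, List.replicate k 'b' ++ List.replicate k 'c') := by
    rw [h, List.append_assoc]; exact pvCountWhile_rep _ _ _ hb
  have h2 : pvCountWhile 'b' (List.replicate k 'b' ++ List.replicate k 'c') = (k, List.replicate k 'c') :=
    pvCountWhile_rep _ _ _ hc
  have h3 : pvCountWhile 'c' (List.replicate k 'c') = (k, []) := by
    simpa using pvCountWhile_rep 'c' k [] (by simp)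
  unfold recognize_an_bn_cn
  simp only [hne, hall, h1, h2, h3, Bool.or_self, Bool.false_eq_true, if_false, ne_eq,
    not_true_eq_false, decide_eq_true_eq]
  simp [hk]

theorem canon_of_portA_true (s : String) (h : recognize_an_bn_cn s = true) :
    ∃ k, 1 ≤ k ∧ s.toList = List.replicate k 'a' ++ List.replicate k 'b' ++ List.replicate k 'c' := by
  unfold recognize_an_bn_cn at h
  dsimp only at h
  split at h
  · exact absurd h (by simp)
  · split at h
    · exact absurd h (by simp)
    · rename_i he
      rw [not_not] at he
      simp only [decide_eq_true_eq] at h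
      obtain ⟨heq1, heq2, hk⟩ := h
      have s1 := (pvCountWhile_spec 'a' s.toList).1
      have s2 := (pvCountWhile_spec 'b' (pvCountWhile 'a' s.toList).2).1
      have s3 := (pvCountWhile_spec 'c' (pvCountWhile 'b' (pvCountWhile 'a' s.toList).2).2).1
      refine ⟨(pvCountWhile 'a' s.toList).1, hk, ?_⟩
      conv_lhs => rw [s1, s2, s3, he]
      rw [← heq2, ← heq1]
      simp [List.append_assoc]

theorem portB_iff_canon (s : String) :
    recognize_an_bn_cn_alt s = true ↔
      ∃ k, 1 ≤ k ∧ s.toList = List.replicate k 'a' ++ List.replicate k 'b' ++ List.replicate k 'c' := by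
  unfold recognize_an_bn_cn_alt
  simp only [Bool.and_eq_true, decide_eq_true_eq, beq_iff_eq]
  constructor
  · rintro ⟨⟨h3, -⟩, heq⟩
    exact ⟨s.toList.length / 3, by omega, heq⟩
  · rintro ⟨k, hk, heq⟩
    have hlen : s.toList.length = 3 * k := by rw [heq]; simp; ring
    have hdiv : s.toList.length / 3 = k := by omega
    rw [hdiv]
    exact ⟨⟨by omega, by omega⟩, heq⟩

-- ===== VERDICT (by name: the statement is the Claim_ definition above) =====
theorem recognize_an_bn_cn_spec : Claim_equal_recognize_an_bn_cn := by
  intro s _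
  unfold Spec_recognize_an_bn_cn
  by_cases h : ∃ k, 1 ≤ k ∧ s.toList = List.replicate k 'a' ++ List.replicate k 'b' ++ List.replicate k 'c'
  · obtain ⟨k, hk, heq⟩ := h
    rw [portA_true_of_canon s k hk heq, (portB_iff_canon s).2 ⟨k, hk, heq⟩]
  · have hA : recognize_an_bn_cn s ≠ true := fun ht => h (canon_of_portA_true s ht)
    have hB : recognize_an_bn_cn_alt s ≠ true := fun ht => h ((portB_iff_canon s).1 ht)
    simp only [Bool.not_eq_true] at hA hB
    rw [hA, hB]
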